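-- pv_equiv track=rewrite | github.com/rocheio/advent-of-code | day3.py | coords_between
-- ===== SOURCE A (Python) =====
-- def coords_between(current, step):
--     """Return all (x,y) coordinate pairs from applying a step from current coords.
--     The last step in the returned list is the new current position.
--     """
--     coords_between = []
--
--     x, y = current
--     direction = step[0]
--     distance = int(step[1:])
--
--     for _ in range(1, distance+1):
--         if direction == "U":
--             y += 1
--         elif direction == "D":
--             y -= 1
--         elif direction == "L":
--             x -= 1
--         elif direction == "R":
--             x += 1
--         coords_between += [(x, y)]
--
--     return coords_between
-- ===== SOURCE B (Python) =====
-- def coords_between(current, step):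
--     """Return all (x,y) coordinate pairs from applying a step from current coords.
--     The last step in the returned list is the new current position.
--     """
--     x, y = current
--     dx, dy = {"U": (0, 1), "D": (0, -1), "L": (-1, 0), "R": (1, 0)}.get(step[0], (0, 0))
--     distance = int(step[1:])
--     return [(x + dx * i, y + dy * i) for i in range(1, distance + 1)]
-- ===== Notes on version B (the rewrite author's own statement) =====
-- stated objective: simpler
-- what changed: Replaces the per-step mutating accumulator with an if/elif chain inside the loop by a single dict lookup of a (dx,dy) delta and a list comprehension that computes each coordinate directly from its index.
import Mathlib
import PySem

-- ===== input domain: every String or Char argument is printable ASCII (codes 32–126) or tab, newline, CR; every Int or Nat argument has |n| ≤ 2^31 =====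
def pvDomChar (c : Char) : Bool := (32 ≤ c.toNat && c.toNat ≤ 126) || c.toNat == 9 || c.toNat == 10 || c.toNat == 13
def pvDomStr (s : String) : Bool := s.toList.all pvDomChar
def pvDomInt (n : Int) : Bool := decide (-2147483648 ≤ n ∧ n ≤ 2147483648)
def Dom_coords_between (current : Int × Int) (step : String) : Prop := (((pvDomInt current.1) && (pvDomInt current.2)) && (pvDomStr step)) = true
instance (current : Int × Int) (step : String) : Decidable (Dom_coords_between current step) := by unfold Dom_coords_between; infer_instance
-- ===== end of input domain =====

-- B replaces A's per-step mutating accumulator with an if/elif chain by a dict-lookup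
-- delta and a comprehension computing each coordinate from its index (objective: simpler).

-- ===== PORT A =====
-- A raises on step = "" (IndexError) or when int(step[1:]) fails (ValueError);
-- the match's fallback `[]` is never reached under Pre_.
def coords_between (current : Int × Int) (step : String) : List (Int × Int) :=
  match PySem.Str.pyGet? step 0, PySem.Int.ofChars? (PySem.List.slice step.toList (some 1) none) with
  | some direction, some distance =>
      ((PySem.List.pyRange 1 (distance + 1) 1).foldl
        (fun (st : (Int × Int) × List (Int × Int)) _ =>
          let x := st.1.1
          let y := st.1.2
          let p : Int × Int :=
            if direction = 'U' then (x, y + 1)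
            else if direction = 'D' then (x, y - 1)
            else if direction = 'L' then (x - 1, y)
            else if direction = 'R' then (x + 1, y)
            else (x, y)
          (p, st.2 ++ [p]))
        (current, ([] : List (Int × Int)))).2
  | _, _ => []

-- ===== PORT B =====
-- B raises exactly where A does (step[0] / int(step[1:])); fallback `[]` unreachable under Pre_.
def coords_between_alt (current : Int × Int) (step : String) : List (Int × Int) :=
  (((PySem.Str.pyGet? step 0).bind fun d =>
    (PySem.Int.ofChars? (PySem.List.slice step.toList (some 1) none)).map fun distance =>
      let delta : Int × Int :=
        (PySem.Dict.ofList [('U', ((0:Int), (1:Int))), ('D', (0, -1)), ('L', (-1, 0)), ('R', (1, 0))]).getD d (0, 0)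
      (PySem.List.pyRange 1 (distance + 1) 1).map
        (fun i => (current.1 + delta.1 * i, current.2 + delta.2 * i))) : Option (List (Int × Int))).getD []

-- ===== PRECONDITION & SPEC =====
-- Pre_ excludes exactly the inputs where Python A raises: empty step (IndexError on
-- step[0]) or step[1:] not parseable by int() (ValueError). B raises there too.
def Pre_coords_between (current : Int × Int) (step : String) : Prop :=
  step.toList ≠ [] ∧ (PySem.Int.ofChars? step.toList.tail).isSome = true
instance (current : Int × Int) (step : String) : Decidable (Pre_coords_between current step) := by unfold Pre_coords_between; infer_instance

def pvWitness_coords_between : (Int × Int) × String := ((3, -2), "U4")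

def Spec_coords_between (current : Int × Int) (step : String) (out : List (Int × Int)) : Prop := out = coords_between_alt current step
instance (current : Int × Int) (step : String) (out : List (Int × Int)) : Decidable (Spec_coords_between current step out) := by unfold Spec_coords_between; infer_instance

-- ===== CLAIM (what is proved, stated in full; the proofs are below) =====
def Claim_equal_coords_between : Prop := ∀ (current : Int × Int) (step : String), Dom_coords_between current step → Pre_coords_between current step → Spec_coords_between current step (coords_between current step)

-- ===== LEMMAS AND PROOFS =====

-- A's loop with a uniform per-step displacement (dx,dy): after m steps the position
-- is start + m·delta and the accumulator lists the first m multiples of the delta.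
theorem loop_pair (dx dy : Int) (g : Int × Int → Int × Int)
    (hg : ∀ p, g p = (p.1 + dx, p.2 + dy)) (x y : Int) :
    ∀ (m : Nat) (acc : List (Int × Int)),
    (PySem.List.pyRange 1 (1 + (m : Int)) 1).foldl
        (fun (st : (Int × Int) × List (Int × Int)) _ => (g st.1, st.2 ++ [g st.1])) ((x, y), acc)
      = ((x + dx * m, y + dy * m),
         acc ++ (PySem.List.pyRange 1 (1 + (m : Int)) 1).map
                  (fun i => (x + dx * i, y + dy * i))) := by
  intro m
  induction m with
  | zero =>
      intro acc
      rw [PySem.List.pyRange_one_eq_nil (by omega)]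
      simp
  | succ k ih =>
      intro acc
      have h2 : 1 + ((k : Int) + 1) = (1 + (k : Int)) + 1 := by ring
      push_cast
      rw [h2, PySem.List.pyRange_one_succ_right (by omega), List.foldl_append,
        ih, List.map_append]
      simp only [List.foldl_cons, List.foldl_nil, hg, List.map_cons, List.map_nil,
        List.append_assoc]
      refine congrArg₂ Prod.mk (congrArg₂ Prod.mk (by ring) (by ring)) ?_
      refine congrArg _ (congrArg _ ?_)
      refine congrArg₂ _ (congrArg₂ Prod.mk (by ring) (by ring)) rfl

-- the direction dict literal has distinct keys, so ofList keeps it as written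
theorem dict_lit :
    PySem.Dict.ofList [('U', ((0:Int), (1:Int))), ('D', (0, -1)), ('L', (-1, 0)), ('R', (1, 0))]
      = PySem.Dict.mk [('U', ((0:Int), (1:Int))), ('D', (0, -1)), ('L', (-1, 0)), ('R', (1, 0))] := by
  decide

theorem coords_eq (current : Int × Int) (c : Char) (n : Int) (step : String)
    (hc : PySem.Str.pyGet? step 0 = some c)
    (hn : PySem.Int.ofChars? (PySem.List.slice step.toList (some 1) none) = some n) :
    coords_between current step = coords_between_alt current step := by
  obtain ⟨x, y⟩ := current
  have key : ∀ (dx dy : Int) (g : Int × Int → Int × Int), (∀ p, g p = (p.1 + dx, p.2 + dy)) →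
      ((PySem.List.pyRange 1 (n + 1) 1).foldl
        (fun (st : (Int × Int) × List (Int × Int)) _ => (g st.1, st.2 ++ [g st.1])) ((x, y), [])).2
      = (PySem.List.pyRange 1 (n + 1) 1).map (fun i => (x + dx * i, y + dy * i)) := by
    intro dx dy g hg
    rcases (by omega : 0 ≤ n ∨ n < 0) with h | h
    · have hn1 : n + 1 = 1 + (n.toNat : Int) := by omega
      rw [hn1, loop_pair dx dy g hg x y n.toNat []]
      simp
    · rw [PySem.List.pyRange_one_eq_nil (by omega)]
      simp
  simp only [coords_between, coords_between_alt, hc, hn, Option.bind_some, Option.map_some, Option.getD_some]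
  by_cases h1 : c = 'U'
  · subst h1
    rw [dict_lit]
    exact key 0 1 (fun p => (p.1, p.2 + 1)) (by intro p; simp)
  by_cases h2 : c = 'D'
  · subst h2
    rw [dict_lit]
    exact key 0 (-1) (fun p => (p.1, p.2 - 1)) (by intro p; simp; ring)
  by_cases h3 : c = 'L'
  · subst h3
    rw [dict_lit]
    exact key (-1) 0 (fun p => (p.1 - 1, p.2)) (by intro p; simp; ring)
  by_cases h4 : c = 'R'
  · subst h4
    rw [dict_lit]
    exact key 1 0 (fun p => (p.1 + 1, p.2)) (by intro p; simp)
  · simp only [h1, h2, h3, h4, if_false, dict_lit]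
    have hget : (PySem.Dict.mk [('U', ((0:Int), (1:Int))), ('D', (0, -1)), ('L', (-1, 0)), ('R', (1, 0))]).getD c (0, 0) = (0, 0) := by
      rw [PySem.Dict.getD_eq_get?_getD]
      simp [Ne.symm h1, Ne.symm h2, Ne.symm h3, Ne.symm h4,
        PySem.Dict.get?]
    rw [hget]
    have := key 0 0 (fun p => (p.1, p.2)) (by intro p; simp)
    simp only [zero_mul, add_zero] at this ⊢
    exact this

-- ===== VERDICT (by name: the statement is the Claim_ definition above) =====
theorem coords_between_spec : Claim_equal_coords_between := by
  intro current step _hdom hpre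
  obtain ⟨hne, hparse⟩ := hpre
  obtain ⟨c, hc⟩ : ∃ c, PySem.Str.pyGet? step 0 = some c := by
    cases hs : step.toList with
    | nil => exact absurd hs hne
    | cons a l => exact ⟨a, by simp [pysem, hs]⟩
  obtain ⟨n, hn⟩ : ∃ n, PySem.Int.ofChars? (PySem.List.slice step.toList (some 1) none) = some n := by
    rw [PySem.List.slice_from_one]
    exact Option.isSome_iff_exists.mp hparse
  exact coords_eq current c n step hc hn
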